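-- pv_equiv track=rewrite | github.com/tomklino/scripts | screen_mcp/screen_lib.py | get_last_command
-- ===== SOURCE A (Python) =====
-- from typing import NamedTuple
--
-- PROMPT_ARROW = '__>'
--
-- class CommandOutput(NamedTuple):
--     prompt: str
--     command: str
--     output: str
--
-- def get_last_command(terminal_output: str) -> CommandOutput | None:
--     """
--     Extract the last command and its output from terminal output.
--
--     Args:
--         terminal_output: Raw terminal output string
--
--     Returns:
--         CommandOutput with prompt, command, and output, or None if not found
--     """
--     lines = terminal_output.strip().split('\n')
--
--     # Find all prompt line indices (lines containing the prompt arrow)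
--     prompt_indices = []
--     for i, line in enumerate(lines):
--         if PROMPT_ARROW not in line:
--             continue
--         # Split on the arrow and take everything after it
--         parts = line.split(PROMPT_ARROW, 1)
--         after_arrow = parts[1] if len(parts) > 1 else ''
--         # Extract prompt (directory/git info) and command
--         tokens = after_arrow.strip().split()
--         if not tokens:
--             prompt_indices.append((i, '', ''))
--             continue
--         # Find where command starts (after dir and optional git:(branch))
--         cmd_start = 1
--         if len(tokens) > 1 and tokens[1].startswith('git:('):
--             cmd_start = 2
--         prompt = PROMPT_ARROW + ' ' + ' '.join(tokens[:cmd_start])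
--         command = ' '.join(tokens[cmd_start:])
--         prompt_indices.append((i, prompt, command))
--
--     if not prompt_indices:
--         return None
--
--     # If the last prompt has no command, the terminal is idle - use second-to-last
--     # If the last prompt has a command, it's still running - use the last one
--     last_idx, last_prompt, last_command = prompt_indices[-1]
--     if last_command:
--         idx, prompt, command = last_idx, last_prompt, last_command
--     elif len(prompt_indices) < 2:
--         return None
--     else:
--         idx, prompt, command = prompt_indices[-2]
--
--     # Output is everything from this prompt line to the end
--     output_lines = lines[idx:]
--     output = '\n'.join(output_lines)
--
--     return CommandOutput(prompt=prompt, command=command, output=output)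
-- ===== SOURCE B (Python) =====
-- from typing import NamedTuple
--
-- PROMPT_ARROW = '__>'
--
-- class CommandOutput(NamedTuple):
--     prompt: str
--     command: str
--     output: str
--
-- def _parse_prompt_line(line):
--     """Return (prompt, command) if line contains the arrow, else None."""
--     if PROMPT_ARROW not in line:
--         return None
--     parts = line.split(PROMPT_ARROW, 1)
--     after_arrow = parts[1] if len(parts) > 1 else ''
--     tokens = after_arrow.strip().split()
--     if not tokens:
--         return ('', '')
--     cmd_start = 1
--     if len(tokens) > 1 and tokens[1].startswith('git:('):
--         cmd_start = 2
--     prompt = PROMPT_ARROW + ' ' + ' '.join(tokens[:cmd_start])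
--     command = ' '.join(tokens[cmd_start:])
--     return (prompt, command)
--
-- def get_last_command(terminal_output):
--     lines = terminal_output.strip().split('\n')
--     # Scan backward: take the last prompt line if it carries a command,
--     # otherwise fall back to the prompt line before it.
--     chosen = None
--     seen_last = False
--     for idx in range(len(lines) - 1, -1, -1):
--         pc = _parse_prompt_line(lines[idx])
--         if pc is None:
--             continue
--         if not seen_last:
--             if pc[1]:
--                 chosen = (idx, pc[0], pc[1])
--                 break
--             seen_last = True
--         else:
--             chosen = (idx, pc[0], pc[1])
--             break
--     if chosen is None:
--         return None
--     idx, prompt, command = chosen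
--     return CommandOutput(prompt=prompt, command=command,
--                          output='\n'.join(lines[idx:]))
-- ===== Notes on version B (the rewrite author's own statement) =====
-- stated objective: alternative
-- what changed: B replaces A's forward pass that materialises the full list of (index, prompt, command) records with a single backward scan over the lines that stops at the first usable prompt line (last prompt if its command is non-empty, else the prompt before it), reusing the same per-line parsing in a helper.
import Mathlib
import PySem

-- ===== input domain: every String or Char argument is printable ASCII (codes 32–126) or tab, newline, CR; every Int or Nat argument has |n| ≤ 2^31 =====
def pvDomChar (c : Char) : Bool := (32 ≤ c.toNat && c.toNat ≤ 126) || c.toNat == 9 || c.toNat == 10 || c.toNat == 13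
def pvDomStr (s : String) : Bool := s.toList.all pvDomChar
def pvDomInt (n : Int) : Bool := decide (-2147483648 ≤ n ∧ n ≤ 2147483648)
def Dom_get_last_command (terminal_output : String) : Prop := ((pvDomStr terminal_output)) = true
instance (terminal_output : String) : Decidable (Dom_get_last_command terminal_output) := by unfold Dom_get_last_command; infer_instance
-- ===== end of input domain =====

-- B replaces A's full forward pass that collects every prompt record with a single
-- backward scan that stops at the first usable prompt line (objective: alternative).

def pvArrow : List Char := ['_', '_', '>']

def pvGitPfx : List Char := ['g', 'i', 't', ':', '(']

-- ===== PORT A =====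
-- literal transliteration of A: enumerate all lines, collect (index, prompt, command)
-- for every prompt line, then pick prompt_indices[-1] or [-2].
def get_last_command (terminal_output : String) : Option (String × String × String) :=
  let lines := PySem.Chars.splitOn (PySem.Chars.strip terminal_output.toList) ['\n']
  let prompt_indices : List (Int × List Char × List Char) :=
    (PySem.List.enumerate lines).foldl (fun acc p =>
      let i := p.1
      let line := p.2
      if PySem.Chars.isIn pvArrow line = false then acc
      else
        let parts := PySem.Chars.splitOnMax line pvArrow 1
        let after_arrow := if parts.length > 1 then (PySem.List.pyGet? parts 1).getD [] else []
        let tokens := PySem.Chars.split₀ (PySem.Chars.strip after_arrow)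
        if tokens = [] then acc ++ [(i, ([] : List Char), ([] : List Char))]
        else
          let cmd_start : Int :=
            if tokens.length > 1 && PySem.Chars.startswith ((PySem.List.pyGet? tokens 1).getD []) pvGitPfx
            then 2 else 1
          let prompt := pvArrow ++ [' '] ++ PySem.Chars.join [' '] (PySem.List.slice tokens none (some cmd_start))
          let command := PySem.Chars.join [' '] (PySem.List.slice tokens (some cmd_start) none)
          acc ++ [(i, prompt, command)]) []
  if prompt_indices = [] then none
  else
    match PySem.List.pyGet? prompt_indices (-1) with
    | none => none
    | some (last_idx, last_prompt, last_command) =>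
      let sel : Option (Int × List Char × List Char) :=
        if last_command ≠ [] then some (last_idx, last_prompt, last_command)
        else if prompt_indices.length < 2 then none
        else PySem.List.pyGet? prompt_indices (-2)
      match sel with
      | none => none
      | some (idx, prompt, command) =>
        some (String.ofList prompt, String.ofList command,
              String.ofList (PySem.Chars.join ['\n'] (PySem.List.slice lines (some idx) none)))

-- ===== PORT B =====
-- B's helper: parse one line into (prompt, command), none if no arrow.
def pvParsePrompt (line : List Char) : Option (List Char × List Char) :=
  if PySem.Chars.isIn pvArrow line = false then none
  else
    let parts := PySem.Chars.splitOnMax line pvArrow 1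
    let after_arrow := if parts.length > 1 then (PySem.List.pyGet? parts 1).getD [] else []
    let tokens := PySem.Chars.split₀ (PySem.Chars.strip after_arrow)
    if tokens = [] then some ([], [])
    else
      let cmd_start : Int :=
        if tokens.length > 1 && PySem.Chars.startswith ((PySem.List.pyGet? tokens 1).getD []) pvGitPfx
        then 2 else 1
      some (pvArrow ++ [' '] ++ PySem.Chars.join [' '] (PySem.List.slice tokens none (some cmd_start)),
            PySem.Chars.join [' '] (PySem.List.slice tokens (some cmd_start) none))

-- B's backward scan over the reversed line list, tracking the real index idx and
-- whether the last prompt line has already been seen (and had an empty command).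
def pvScanBack (rev : List (List Char)) (idx : Int) (seenLast : Bool) :
    Option (Int × List Char × List Char) :=
  match rev with
  | [] => none
  | l :: rest =>
    match pvParsePrompt l with
    | none => pvScanBack rest (idx - 1) seenLast
    | some (p, c) =>
      if seenLast then some (idx, p, c)
      else if c ≠ [] then some (idx, p, c)
      else pvScanBack rest (idx - 1) true

def get_last_command_alt (terminal_output : String) : Option (String × String × String) :=
  let lines := PySem.Chars.splitOn (PySem.Chars.strip terminal_output.toList) ['\n']
  match pvScanBack lines.reverse ((lines.length : Int) - 1) false with
  | none => none
  | some (idx, prompt, command) =>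
    some (String.ofList prompt, String.ofList command,
          String.ofList (PySem.Chars.join ['\n'] (PySem.List.slice lines (some idx) none)))

-- ===== PRECONDITION & SPEC =====
def Spec_get_last_command (terminal_output : String) (out : Option (String × String × String)) : Prop := out = get_last_command_alt terminal_output
instance (terminal_output : String) (out : Option (String × String × String)) : Decidable (Spec_get_last_command terminal_output out) := by unfold Spec_get_last_command; infer_instance

-- ===== CLAIM (what is proved, stated in full; the proofs are below) =====
def Claim_equal_get_last_command : Prop := ∀ (terminal_output : String), Dom_get_last_command terminal_output → Spec_get_last_command terminal_output (get_last_command terminal_output)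

-- ===== LEMMAS AND PROOFS =====

-- the record a prompt line contributes to A's prompt_indices list
def pvRecord (p : Int × List Char) : List (Int × List Char × List Char) :=
  match pvParsePrompt p.2 with
  | none => []
  | some (pr, c) => [(p.1, pr, c)]

theorem pvA_step (acc : List (Int × List Char × List Char)) (p : Int × List Char) :
    (let i := p.1
     let line := p.2
     if PySem.Chars.isIn pvArrow line = false then acc
     else
       let parts := PySem.Chars.splitOnMax line pvArrow 1
       let after_arrow := if parts.length > 1 then (PySem.List.pyGet? parts 1).getD [] else []
       let tokens := PySem.Chars.split₀ (PySem.Chars.strip after_arrow)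
       if tokens = [] then acc ++ [(i, ([] : List Char), ([] : List Char))]
       else
         let cmd_start : Int :=
           if tokens.length > 1 && PySem.Chars.startswith ((PySem.List.pyGet? tokens 1).getD []) pvGitPfx
           then 2 else 1
         let prompt := pvArrow ++ [' '] ++ PySem.Chars.join [' '] (PySem.List.slice tokens none (some cmd_start))
         let command := PySem.Chars.join [' '] (PySem.List.slice tokens (some cmd_start) none)
         acc ++ [(i, prompt, command)]) = acc ++ pvRecord p := by
  simp only [pvRecord, pvParsePrompt]
  split_ifs <;> simp

-- A's selection from the collected records, expressed on the reversed record list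
def pvSelRev (r : List (Int × List Char × List Char)) : Option (Int × List Char × List Char) :=
  match r with
  | [] => none
  | (i, p, c) :: rest => if c ≠ [] then some (i, p, c) else rest.head?

-- the records of a (reversed) line list, indices counting DOWN from idx
def pvPR : List (List Char) → Int → List (Int × List Char × List Char)
  | [], _ => []
  | l :: rest, idx => pvRecord (idx, l) ++ pvPR rest (idx - 1)

theorem pvPR_append (a b : List (List Char)) (idx : Int) :
    pvPR (a ++ b) idx = pvPR a idx ++ pvPR b (idx - a.length) := by
  induction a generalizing idx with
  | nil => simp [pvPR]
  | cons l rest ih =>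
    simp only [List.cons_append, pvPR, ih, List.append_assoc, List.length_cons]
    congr 2
    push_cast
    ring_nf

-- B's backward scan, once seenLast is set, returns the first parsed record
theorem pvScanBack_true (rev : List (List Char)) (idx : Int) :
    pvScanBack rev idx true = (pvPR rev idx).head? := by
  induction rev generalizing idx with
  | nil => simp [pvScanBack, pvPR]
  | cons l rest ih =>
    simp only [pvScanBack, pvPR, pvRecord]
    cases h : pvParsePrompt l with
    | none => simp [ih]
    | some pc => cases pc with | mk p c => simp

theorem pvScanBack_false (rev : List (List Char)) (idx : Int) :
    pvScanBack rev idx false = pvSelRev (pvPR rev idx) := by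
  induction rev generalizing idx with
  | nil => simp [pvScanBack, pvPR, pvSelRev]
  | cons l rest ih =>
    simp only [pvScanBack, pvPR, pvRecord]
    cases h : pvParsePrompt l with
    | none => simp [ih]
    | some pc =>
      cases pc with
      | mk p c =>
        by_cases hc : c = []
        · simp [hc, pvSelRev, pvScanBack_true]
        · simp [hc, pvSelRev]

-- the backward records of the reversed lines are the reverse of A's forward records
theorem pv_main (ls : List (List Char)) (s : Int) :
    pvPR ls.reverse (s + (ls.length : Int) - 1) = ((PySem.List.enumerate ls s).flatMap pvRecord).reverse := by
  induction ls generalizing s with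
  | nil => simp [pvPR]
  | cons l rest ih =>
    simp only [List.reverse_cons, PySem.List.enumerate_cons, List.flatMap_cons,
      List.reverse_append, pvPR_append]
    have h1 : pvPR rest.reverse (s + (↑(l :: rest).length : Int) - 1)
        = ((PySem.List.enumerate rest (s + 1)).flatMap pvRecord).reverse := by
      rw [← ih (s + 1)]
      congr 1
      simp
      ring
    rw [h1]
    have h2 : (s + (↑(l :: rest).length : Int) - 1) - (rest.reverse.length : Int) = s := by
      simp
      ring
    rw [h2]
    have h3 : pvPR [l] s = pvRecord (s, l) := by simp [pvPR, pvRecord]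
    rw [h3]
    cases h : pvParsePrompt l with
    | none => simp [pvRecord, h]
    | some pc => cases pc with | mk p c => simp [pvRecord, h]

-- A's tail logic on the forward record list equals B's selection (pvSelRev of the
-- reversed records), for any builder f of the final answer
theorem pvTail {β : Type} (xs : List (Int × List Char × List Char))
    (f : Int → List Char → List Char → β) (z : β) :
    (if xs = [] then z
     else
       match PySem.List.pyGet? xs (-1) with
       | none => z
       | some (last_idx, last_prompt, last_command) =>
         match (if last_command ≠ [] then some (last_idx, last_prompt, last_command)
                else if xs.length < 2 then none
                else PySem.List.pyGet? xs (-2)) with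
         | none => z
         | some (idx, prompt, command) => f idx prompt command)
    = (match pvSelRev xs.reverse with
       | none => z
       | some (idx, prompt, command) => f idx prompt command) := by
  cases hrev : xs.reverse with
  | nil =>
    have : xs = [] := by simpa using congrArg List.reverse hrev
    simp [this, pvSelRev]
  | cons a rest =>
    have hxs : xs = rest.reverse ++ [a] := by
      have := congrArg List.reverse hrev
      simpa using this
    subst hxs
    have hne : rest.reverse ++ [a] ≠ [] := by simp
    rcases a with ⟨i, p, c⟩
    simp only [if_neg hne, PySem.List.pyGet?_neg_one_append_singleton, pvSelRev]
    by_cases hc : c = []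
    · simp only [hc, ne_eq, not_true_eq_false, if_false]
      cases rest with
      | nil => simp
      | cons b rb =>
        have hlen : ¬ ((b :: rb).reverse ++ [(i, p, ([] : List Char))]).length < 2 := by
          simp
        simp only [if_neg hlen]
        rw [PySem.List.pyGet?_neg_ofNat _ 2 (by omega) (by simp)]
        simp
    · simp [hc]

-- the equivalence, for an arbitrary line list
theorem pv_body (ls : List (List Char)) (f : Int → List Char → List Char →
      Option (String × String × String)) :
    (let prompt_indices : List (Int × List Char × List Char) :=
      (PySem.List.enumerate ls).foldl (fun acc p =>
        let i := p.1
        let line := p.2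
        if PySem.Chars.isIn pvArrow line = false then acc
        else
          let parts := PySem.Chars.splitOnMax line pvArrow 1
          let after_arrow := if parts.length > 1 then (PySem.List.pyGet? parts 1).getD [] else []
          let tokens := PySem.Chars.split₀ (PySem.Chars.strip after_arrow)
          if tokens = [] then acc ++ [(i, ([] : List Char), ([] : List Char))]
          else
            let cmd_start : Int :=
              if tokens.length > 1 && PySem.Chars.startswith ((PySem.List.pyGet? tokens 1).getD []) pvGitPfx
              then 2 else 1
            let prompt := pvArrow ++ [' '] ++ PySem.Chars.join [' '] (PySem.List.slice tokens none (some cmd_start))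
            let command := PySem.Chars.join [' '] (PySem.List.slice tokens (some cmd_start) none)
            acc ++ [(i, prompt, command)]) []
     if prompt_indices = [] then none
     else
       match PySem.List.pyGet? prompt_indices (-1) with
       | none => none
       | some (last_idx, last_prompt, last_command) =>
         match (if last_command ≠ [] then some (last_idx, last_prompt, last_command)
                else if prompt_indices.length < 2 then none
                else PySem.List.pyGet? prompt_indices (-2)) with
         | none => none
         | some (idx, prompt, command) => f idx prompt command)
    = (match pvScanBack ls.reverse ((ls.length : Int) - 1) false with
       | none => none
       | some (idx, prompt, command) => f idx prompt command) := by
  have hfold : (PySem.List.enumerate ls).foldl (fun acc p =>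
        let i := p.1
        let line := p.2
        if PySem.Chars.isIn pvArrow line = false then acc
        else
          let parts := PySem.Chars.splitOnMax line pvArrow 1
          let after_arrow := if parts.length > 1 then (PySem.List.pyGet? parts 1).getD [] else []
          let tokens := PySem.Chars.split₀ (PySem.Chars.strip after_arrow)
          if tokens = [] then acc ++ [(i, ([] : List Char), ([] : List Char))]
          else
            let cmd_start : Int :=
              if tokens.length > 1 && PySem.Chars.startswith ((PySem.List.pyGet? tokens 1).getD []) pvGitPfx
              then 2 else 1
            let prompt := pvArrow ++ [' '] ++ PySem.Chars.join [' '] (PySem.List.slice tokens none (some cmd_start))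
            let command := PySem.Chars.join [' '] (PySem.List.slice tokens (some cmd_start) none)
            acc ++ [(i, prompt, command)]) []
      = (PySem.List.enumerate ls).flatMap pvRecord := by
    rw [show (fun (acc : List (Int × List Char × List Char)) (p : Int × List Char) =>
        let i := p.1
        let line := p.2
        if PySem.Chars.isIn pvArrow line = false then acc
        else
          let parts := PySem.Chars.splitOnMax line pvArrow 1
          let after_arrow := if parts.length > 1 then (PySem.List.pyGet? parts 1).getD [] else []
          let tokens := PySem.Chars.split₀ (PySem.Chars.strip after_arrow)
          if tokens = [] then acc ++ [(i, ([] : List Char), ([] : List Char))]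
          else
            let cmd_start : Int :=
              if tokens.length > 1 && PySem.Chars.startswith ((PySem.List.pyGet? tokens 1).getD []) pvGitPfx
              then 2 else 1
            let prompt := pvArrow ++ [' '] ++ PySem.Chars.join [' '] (PySem.List.slice tokens none (some cmd_start))
            let command := PySem.Chars.join [' '] (PySem.List.slice tokens (some cmd_start) none)
            acc ++ [(i, prompt, command)])
      = (fun acc p => acc ++ pvRecord p) from funext fun acc => funext fun p => pvA_step acc p]
    rw [PySem.List.foldl_append_eq_flatMap]
    simp
  have hmain : pvPR ls.reverse ((ls.length : Int) - 1)
      = ((PySem.List.enumerate ls).flatMap pvRecord).reverse := by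
    have := pv_main ls 0
    simpa using this
  simp only [hfold, pvScanBack_false, hmain]
  exact pvTail _ f none

-- ===== VERDICT (by name: the statement is the Claim_ definition above) =====
theorem get_last_command_spec : Claim_equal_get_last_command := by
  intro t _
  show get_last_command t = get_last_command_alt t
  unfold get_last_command get_last_command_alt
  exact pv_body _ _
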